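-- pv_equiv track=rewrite | github.com/Chrand123/air-quality | Project 3/project3.py | _extract_from_input
-- ===== SOURCE A (Python) =====
-- TYPES_OF_INPUT = {
--     'center': {
--         'nominatim': 'CENTER NOMINATIM ',
--         'file': 'CENTER FILE '
--         },
--     'range': 'RANGE ',
--     'threshold': 'THRESHOLD ',
--     'max': 'MAX ',
--     'aqi': {
--         'purpleair': 'AQI PURPLEAIR',
--         'file': 'AQI FILE '
--         },
--     'reverse': {
--         'nominatim': 'REVERSE NOMINATIM',
--         'files': 'REVERSE FILES '
--         }
--     }
--
-- def _extract_from_input(the_input: str) -> (str, str):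
--     '''Sees if the input provided is valid based on the type(s) of input;
--     If valid, returns a tuple of the input type and the rest of input;
--     else, returns a tuple of None and None'''
--     for input_type in TYPES_OF_INPUT.items():
--         if type(input_type[1]) == dict:
--             for sub_input_type in input_type[1].items():
--                 if the_input.startswith(sub_input_type[1]):
--                     rest_of_input = the_input.replace(sub_input_type[1], '')
--                     return (sub_input_type[0], rest_of_input)
--         else:
--             if the_input.startswith(input_type[1]):
--                 rest_of_input = the_input.replace(input_type[1], '')
--                 return (input_type[0], rest_of_input)
--
--     # invalid input
--     return (None, None)
-- ===== SOURCE B (Python) =====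
-- TYPES_OF_INPUT = {
--     'center': {
--         'nominatim': 'CENTER NOMINATIM ',
--         'file': 'CENTER FILE '
--         },
--     'range': 'RANGE ',
--     'threshold': 'THRESHOLD ',
--     'max': 'MAX ',
--     'aqi': {
--         'purpleair': 'AQI PURPLEAIR',
--         'file': 'AQI FILE '
--         },
--     'reverse': {
--         'nominatim': 'REVERSE NOMINATIM',
--         'files': 'REVERSE FILES '
--         }
--     }
--
-- # Flat (name, prefix) table built once from TYPES_OF_INPUT, preserving order.
-- _PREFIX_TABLE = []
-- for _name, _value in TYPES_OF_INPUT.items():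
--     if isinstance(_value, dict):
--         _PREFIX_TABLE.extend(_value.items())
--     else:
--         _PREFIX_TABLE.append((_name, _value))
--
--
-- def _extract_from_input(the_input: str) -> (str, str):
--     for name, prefix in _PREFIX_TABLE:
--         if the_input.startswith(prefix):
--             return (name, the_input.replace(prefix, ''))
--     return (None, None)
-- ===== Notes on version B (the rewrite author's own statement) =====
-- stated objective: simpler
-- what changed: Replaces the nested two-level traversal with its isinstance/dict branch by one flat (name, prefix) table built once at module load, and a single first-match loop over it.
import Mathlib
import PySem

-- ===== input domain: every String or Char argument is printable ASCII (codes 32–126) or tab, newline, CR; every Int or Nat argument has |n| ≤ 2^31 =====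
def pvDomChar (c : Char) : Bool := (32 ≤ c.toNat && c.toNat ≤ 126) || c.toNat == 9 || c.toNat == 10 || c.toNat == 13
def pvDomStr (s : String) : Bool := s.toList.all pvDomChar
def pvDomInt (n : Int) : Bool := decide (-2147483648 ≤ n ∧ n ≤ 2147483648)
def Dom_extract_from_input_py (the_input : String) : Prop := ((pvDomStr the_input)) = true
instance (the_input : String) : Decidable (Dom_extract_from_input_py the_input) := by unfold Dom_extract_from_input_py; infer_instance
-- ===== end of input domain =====

-- B replaces A's nested dict traversal with one flat (name, prefix) table and a single first-match loop (simpler decomposition, same cost).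

-- ===== PORT A =====
-- a dict value in TYPES_OF_INPUT is either a plain prefix string or a sub-dict
inductive PyVal
  | str : String → PyVal
  | dict : List (String × String) → PyVal

def typesOfInput : List (String × PyVal) :=
  [ ("center", .dict [("nominatim", "CENTER NOMINATIM "), ("file", "CENTER FILE ")]),
    ("range", .str "RANGE "),
    ("threshold", .str "THRESHOLD "),
    ("max", .str "MAX "),
    ("aqi", .dict [("purpleair", "AQI PURPLEAIR"), ("file", "AQI FILE ")]),
    ("reverse", .dict [("nominatim", "REVERSE NOMINATIM"), ("files", "REVERSE FILES ")]) ]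

-- inner 'for sub_input_type in input_type[1].items()' loop; none = no return hit
def innerLoopA (the_input : String) : List (String × String) → Option (Option String × Option String)
  | [] => none
  | (k, p) :: rest =>
      if PySem.Str.startswith the_input p then
        some (some k, some (PySem.Str.replace the_input p ""))
      else innerLoopA the_input rest

-- outer 'for input_type in TYPES_OF_INPUT.items()' loop
def outerLoopA (the_input : String) : List (String × PyVal) → Option String × Option String
  | [] => (none, none)
  | (_, .dict sub) :: rest =>
      match innerLoopA the_input sub with
      | some r => r
      | none => outerLoopA the_input rest
  | (k, .str p) :: rest =>
      if PySem.Str.startswith the_input p then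
        (some k, some (PySem.Str.replace the_input p ""))
      else outerLoopA the_input rest

def extract_from_input_py (the_input : String) : Option String × Option String :=
  outerLoopA the_input typesOfInput

-- ===== PORT B =====
-- module-level loop of Source B building the flat table from TYPES_OF_INPUT
def prefixTable : List (String × String) :=
  typesOfInput.foldl
    (fun acc e =>
      match e.2 with
      | .dict sub => acc ++ sub
      | .str p => acc ++ [(e.1, p)])
    []

-- the single first-match loop of Source B
def findPrefix (the_input : String) : List (String × String) → Option String × Option String
  | [] => (none, none)
  | (name, p) :: rest =>
      if PySem.Str.startswith the_input p then
        (some name, some (PySem.Str.replace the_input p ""))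
      else findPrefix the_input rest

def extract_from_input_py_alt (the_input : String) : Option String × Option String :=
  findPrefix the_input prefixTable

-- ===== PRECONDITION & SPEC =====
def Spec_extract_from_input_py (the_input : String) (out : Option String × Option String) : Prop := out = extract_from_input_py_alt the_input
instance (the_input : String) (out : Option String × Option String) : Decidable (Spec_extract_from_input_py the_input out) := by unfold Spec_extract_from_input_py; infer_instance

-- ===== CLAIM (what is proved, stated in full; the proofs are below) =====
def Claim_equal_extract_from_input_py : Prop := ∀ (the_input : String), Dom_extract_from_input_py the_input → Spec_extract_from_input_py the_input (extract_from_input_py the_input)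

-- ===== LEMMAS AND PROOFS =====

-- flat table as a flatMap (proof-side view of prefixTable)
def flatEntries (l : List (String × PyVal)) : List (String × String) :=
  l.flatMap (fun e => match e.2 with | .dict sub => sub | .str p => [(e.1, p)])

theorem prefixTable_eq_flat : prefixTable = flatEntries typesOfInput := by
  rfl

theorem findPrefix_append (s : String) (sub ys : List (String × String)) :
    findPrefix s (sub ++ ys) =
      (match innerLoopA s sub with
       | some r => r
       | none => findPrefix s ys) := by
  induction sub with
  | nil => rfl
  | cons hd tl ih =>
      obtain ⟨k, p⟩ := hd
      simp only [List.cons_append, findPrefix, innerLoopA]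
      by_cases h : PySem.Chars.startswith s.toList p.toList = true
      · simp [h]
      · simp [h, ih]

theorem outer_eq_flat (s : String) (l : List (String × PyVal)) :
    outerLoopA s l = findPrefix s (flatEntries l) := by
  induction l with
  | nil => rfl
  | cons hd tl ih =>
      obtain ⟨k, v⟩ := hd
      cases v with
      | str p =>
          simp only [outerLoopA, flatEntries, List.flatMap_cons, List.singleton_append,
            findPrefix]
          by_cases h : PySem.Chars.startswith s.toList p.toList = true
          · simp [h]
          · simpa [h] using ih
      | dict sub =>
          simp only [outerLoopA, flatEntries, List.flatMap_cons]
          rw [findPrefix_append]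
          cases innerLoopA s sub with
          | some r => rfl
          | none => simpa using ih

-- ===== VERDICT (by name: the statement is the Claim_ definition above) =====
theorem extract_from_input_py_spec : Claim_equal_extract_from_input_py := by
  intro s _
  show outerLoopA s typesOfInput = findPrefix s prefixTable
  rw [prefixTable_eq_flat, outer_eq_flat]
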